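-- pv_equiv track=rewrite | github.com/MaryIv76/kg2023-labrabota4-RasterAlgorithms | main.py | add_bresenham_circle_coordinates
-- ===== SOURCE A (Python) =====
-- def add_bresenham_circle_coordinates(x_coordinates, y_coordinates, x0, y0):
--     x_all_coordinates = []
--     y_all_coordinates = []
--
--     for i in range(len(x_coordinates)):
--         x = x_coordinates[i]
--         y = y_coordinates[i]
--         x_all_coordinates.append(x + x0)
--         y_all_coordinates.append(y + y0)
--     for i in reversed(range(len(x_coordinates))):
--         x = x_coordinates[i]
--         y = y_coordinates[i]
--         x_all_coordinates.append(y + x0)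
--         y_all_coordinates.append(x + y0)
--     for i in range(len(x_coordinates)):
--         x = x_coordinates[i]
--         y = y_coordinates[i]
--         x_all_coordinates.append(y + x0)
--         y_all_coordinates.append(-x + y0)
--     for i in reversed(range(len(x_coordinates))):
--         x = x_coordinates[i]
--         y = y_coordinates[i]
--         x_all_coordinates.append(x + x0)
--         y_all_coordinates.append(-y + y0)
--     for i in range(len(x_coordinates)):
--         x = x_coordinates[i]
--         y = y_coordinates[i]
--         x_all_coordinates.append(-x + x0)
--         y_all_coordinates.append(-y + y0)
--     for i in reversed(range(len(x_coordinates))):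
--         x = x_coordinates[i]
--         y = y_coordinates[i]
--         x_all_coordinates.append(-y + x0)
--         y_all_coordinates.append(-x + y0)
--     for i in range(len(x_coordinates)):
--         x = x_coordinates[i]
--         y = y_coordinates[i]
--         x_all_coordinates.append(-y + x0)
--         y_all_coordinates.append(x + y0)
--     for i in reversed(range(len(x_coordinates))):
--         x = x_coordinates[i]
--         y = y_coordinates[i]
--         x_all_coordinates.append(-x + x0)
--         y_all_coordinates.append(y + y0)
--     return x_all_coordinates, y_all_coordinates
-- ===== SOURCE B (Python) =====
-- def add_bresenham_circle_coordinates(x_coordinates, y_coordinates, x0, y0):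
--     # Mirror-doubling: build one octant's points, then reflect the whole
--     # accumulated arc three times (swap, flip-y, flip-x) to cover all 8 octants.
--     pairs = [(x_coordinates[i], y_coordinates[i]) for i in range(len(x_coordinates))]
--     pairs = pairs + [(b, a) for (a, b) in reversed(pairs)]
--     pairs = pairs + [(a, -b) for (a, b) in reversed(pairs)]
--     pairs = pairs + [(-a, b) for (a, b) in reversed(pairs)]
--     return [a + x0 for (a, _) in pairs], [b + y0 for (_, b) in pairs]
-- ===== Notes on version B (the rewrite author's own statement) =====
-- stated objective: simpler
-- what changed: Instead of eight explicit per-octant index passes over the input arrays, B builds one octant's point list and then doubles it three times by reflecting the whole accumulated arc (swap x/y, negate y, negate x), finally adding the offsets in one unzip pass.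
import Mathlib
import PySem

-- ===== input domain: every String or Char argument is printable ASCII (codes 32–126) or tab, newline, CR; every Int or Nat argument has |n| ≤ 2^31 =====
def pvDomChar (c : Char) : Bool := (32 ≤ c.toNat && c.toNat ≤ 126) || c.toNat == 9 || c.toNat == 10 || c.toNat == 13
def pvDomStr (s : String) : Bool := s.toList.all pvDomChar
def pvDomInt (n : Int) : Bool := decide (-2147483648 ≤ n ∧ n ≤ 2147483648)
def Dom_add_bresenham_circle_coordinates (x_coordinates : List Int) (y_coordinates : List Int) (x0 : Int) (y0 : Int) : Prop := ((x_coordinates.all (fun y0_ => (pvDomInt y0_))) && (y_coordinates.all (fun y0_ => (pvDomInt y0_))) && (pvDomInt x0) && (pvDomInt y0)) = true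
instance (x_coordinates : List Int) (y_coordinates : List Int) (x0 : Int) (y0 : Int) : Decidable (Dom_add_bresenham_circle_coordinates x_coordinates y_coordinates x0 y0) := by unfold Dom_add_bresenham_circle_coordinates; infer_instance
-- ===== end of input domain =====

-- B replaces A's eight explicit per-octant passes by mirror-doubling: build one
-- octant's pair list, reflect the whole accumulated arc three times, then add
-- the offsets once (objective: simpler).

-- ===== PORT A =====
-- Indexing x[i]/y[i] is via pyGetD (in range for every i under Pre_; Python raises IndexError outside Pre_).
def add_bresenham_circle_coordinates (x_coordinates : List Int) (y_coordinates : List Int) (x0 : Int) (y0 : Int) : List Int × List Int :=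
  let r := PySem.List.pyRange 0 (x_coordinates.length : Int) 1
  let s1 := r.foldl (fun (s : List Int × List Int) i =>
    (s.1 ++ [PySem.List.pyGetD x_coordinates i 0 + x0], s.2 ++ [PySem.List.pyGetD y_coordinates i 0 + y0])) ([], [])
  let s2 := r.reverse.foldl (fun (s : List Int × List Int) i =>
    (s.1 ++ [PySem.List.pyGetD y_coordinates i 0 + x0], s.2 ++ [PySem.List.pyGetD x_coordinates i 0 + y0])) s1
  let s3 := r.foldl (fun (s : List Int × List Int) i =>
    (s.1 ++ [PySem.List.pyGetD y_coordinates i 0 + x0], s.2 ++ [-(PySem.List.pyGetD x_coordinates i 0) + y0])) s2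
  let s4 := r.reverse.foldl (fun (s : List Int × List Int) i =>
    (s.1 ++ [PySem.List.pyGetD x_coordinates i 0 + x0], s.2 ++ [-(PySem.List.pyGetD y_coordinates i 0) + y0])) s3
  let s5 := r.foldl (fun (s : List Int × List Int) i =>
    (s.1 ++ [-(PySem.List.pyGetD x_coordinates i 0) + x0], s.2 ++ [-(PySem.List.pyGetD y_coordinates i 0) + y0])) s4
  let s6 := r.reverse.foldl (fun (s : List Int × List Int) i =>
    (s.1 ++ [-(PySem.List.pyGetD y_coordinates i 0) + x0], s.2 ++ [-(PySem.List.pyGetD x_coordinates i 0) + y0])) s5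
  let s7 := r.foldl (fun (s : List Int × List Int) i =>
    (s.1 ++ [-(PySem.List.pyGetD y_coordinates i 0) + x0], s.2 ++ [PySem.List.pyGetD x_coordinates i 0 + y0])) s6
  let s8 := r.reverse.foldl (fun (s : List Int × List Int) i =>
    (s.1 ++ [-(PySem.List.pyGetD x_coordinates i 0) + x0], s.2 ++ [PySem.List.pyGetD y_coordinates i 0 + y0])) s7
  s8

-- ===== PORT B =====
def add_bresenham_circle_coordinates_alt (x_coordinates : List Int) (y_coordinates : List Int) (x0 : Int) (y0 : Int) : List Int × List Int :=
  let r := PySem.List.pyRange 0 (x_coordinates.length : Int) 1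
  let p0 := r.map (fun i => (PySem.List.pyGetD x_coordinates i 0, PySem.List.pyGetD y_coordinates i 0))
  let p1 := p0 ++ p0.reverse.map (fun q => (q.2, q.1))
  let p2 := p1 ++ p1.reverse.map (fun q => (q.1, -q.2))
  let p3 := p2 ++ p2.reverse.map (fun q => (-q.1, q.2))
  (p3.map (fun q => q.1 + x0), p3.map (fun q => q.2 + y0))

-- ===== PRECONDITION & SPEC =====
-- Pre_ excludes exactly the inputs where Python A raises IndexError: y shorter than x.
def Pre_add_bresenham_circle_coordinates (x_coordinates : List Int) (y_coordinates : List Int) (x0 : Int) (y0 : Int) : Prop :=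
  x_coordinates.length ≤ y_coordinates.length
instance (x_coordinates : List Int) (y_coordinates : List Int) (x0 : Int) (y0 : Int) : Decidable (Pre_add_bresenham_circle_coordinates x_coordinates y_coordinates x0 y0) := by unfold Pre_add_bresenham_circle_coordinates; infer_instance
def pvWitness_add_bresenham_circle_coordinates : List Int × List Int × Int × Int := ([1, 2], [3, 4], 5, 6)

def Spec_add_bresenham_circle_coordinates (x_coordinates : List Int) (y_coordinates : List Int) (x0 : Int) (y0 : Int) (out : List Int × List Int) : Prop := out = add_bresenham_circle_coordinates_alt x_coordinates y_coordinates x0 y0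
instance (x_coordinates : List Int) (y_coordinates : List Int) (x0 : Int) (y0 : Int) (out : List Int × List Int) : Decidable (Spec_add_bresenham_circle_coordinates x_coordinates y_coordinates x0 y0 out) := by unfold Spec_add_bresenham_circle_coordinates; infer_instance

-- ===== CLAIM (what is proved, stated in full; the proofs are below) =====
def Claim_equal_add_bresenham_circle_coordinates : Prop := ∀ (x_coordinates : List Int) (y_coordinates : List Int) (x0 : Int) (y0 : Int), Dom_add_bresenham_circle_coordinates x_coordinates y_coordinates x0 y0 → Pre_add_bresenham_circle_coordinates x_coordinates y_coordinates x0 y0 → Spec_add_bresenham_circle_coordinates x_coordinates y_coordinates x0 y0 (add_bresenham_circle_coordinates x_coordinates y_coordinates x0 y0)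

-- ===== LEMMAS AND PROOFS =====
theorem pv_foldl_pair_append {α : Type} (f g : α → Int) (l : List α) (s : List Int × List Int) :
    l.foldl (fun (s : List Int × List Int) a => (s.1 ++ [f a], s.2 ++ [g a])) s
      = (s.1 ++ l.map f, s.2 ++ l.map g) := by
  induction l generalizing s with
  | nil => simp
  | cons a t ih => simp [ih]

-- ===== VERDICT (by name: the statement is the Claim_ definition above) =====
theorem add_bresenham_circle_coordinates_spec : Claim_equal_add_bresenham_circle_coordinates := by
  intro x y x0 y0 _ _
  unfold Spec_add_bresenham_circle_coordinates
  unfold add_bresenham_circle_coordinates add_bresenham_circle_coordinates_alt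
  simp only [pv_foldl_pair_append, List.map_append, List.map_reverse, List.map_map,
    List.reverse_append, List.reverse_reverse, Function.comp_def, List.append_assoc,
    List.nil_append]
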